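-- pv_equiv track=rewrite | github.com/mcriley821/AdventOfCode | add_description.py | process_description
-- ===== SOURCE A (Python) =====
-- def process_description(description: str) -> list[str]:
--     desc_lines = description.split("\n")
--     for line_no, line in enumerate(iter(desc_lines)):
--         line = "#  " + line.lstrip()
--         if len(line) > 80:
--             ind = 80
--             while not line[ind].isspace():
--                 ind -= 1
--
--             desc_lines[line_no] = line[:ind] + '\n'
--             desc_lines.insert(line_no + 1, line[ind + 1:])
--         else:
--             desc_lines[line_no] = line + '\n'
--     return desc_lines
-- ===== SOURCE B (Python) =====
-- def process_description(description: str) -> list[str]: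
--     out = []
--     for segment in description.split("\n"):
--         out.extend(_wrap(segment))
--     return out
--
--
-- def _wrap(segment: str) -> list[str]:
--     """Wrap one logical line into physical '#  '-prefixed lines, recursively."""
--     line = "#  " + segment.lstrip()
--     if len(line) <= 80:
--         return [line + "\n"]
--     ind = max(i for i in range(81) if line[i].isspace())
--     return [line[:ind] + "\n"] + _wrap(line[ind + 1:])
-- ===== Notes on version B (the rewrite author's own statement) =====
-- stated objective: alternative
-- what changed: A wraps by mutating the line list while iterating it (overwriting the current slot and inserting the overflow after it); B wraps each logical line with a self-contained recursive helper that finds the break point as the maximum whitespace index in range(81) and flattens the per-line results.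
import Mathlib
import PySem

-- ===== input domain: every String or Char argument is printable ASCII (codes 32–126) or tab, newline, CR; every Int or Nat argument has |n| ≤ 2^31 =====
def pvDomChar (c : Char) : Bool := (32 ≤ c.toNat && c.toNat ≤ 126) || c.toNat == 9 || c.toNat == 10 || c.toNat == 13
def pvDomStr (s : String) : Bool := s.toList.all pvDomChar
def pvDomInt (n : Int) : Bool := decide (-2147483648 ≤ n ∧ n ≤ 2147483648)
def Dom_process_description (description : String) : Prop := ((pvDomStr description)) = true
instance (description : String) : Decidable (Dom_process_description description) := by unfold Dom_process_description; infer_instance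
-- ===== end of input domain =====

-- B replaces A's mutate-the-list-while-iterating wrap with a recursive per-line
-- wrapper flattened over the split lines (objective: alternative decomposition, same cost).

-- ===== PORT A =====
-- `while not line[ind].isspace(): ind -= 1`, started at ind = 80.  Exact on every input the
-- claim covers: line = "#  " + … has spaces at indices 1 and 2, so Python's scan always stops
-- at an index ≥ 1 and never reads a negative index; the 'x' default of getD is never returned
-- there (the scan is only invoked with 80 < line.length).
def pvScan (l : List Char) : Nat → Nat
  | 0 => 0
  | i+1 => if PySem.Chars.isspace (l.getD (i+1) 'x') then i+1 else pvScan l i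

-- the for-loop over the growing list: `done` = slots already rewritten, `todo` = the live
-- remainder of desc_lines (its head is what the iterator yields next; the inserted overflow
-- becomes the new head).  The fuel only makes the recursion total in Lean: on every input
-- admitted by Pre_ it is sufficient (outside Pre_ the Python loops forever).
def pvLoopA (fuel : Nat) (done todo : List (List Char)) : List (List Char) :=
  match fuel, todo with
  | _, [] => done
  | 0, _ => done
  | f+1, e :: rest =>
    let line := '#' :: ' ' :: ' ' :: PySem.Chars.lstrip e
    if 80 < line.length then
      pvLoopA f (done ++ [line.take (pvScan line 80) ++ ['\n']])
        (line.drop (pvScan line 80 + 1) :: rest)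
    else
      pvLoopA f (done ++ [line ++ ['\n']]) rest

def process_description (description : String) : List String :=
  let desc_lines := (PySem.Chars.split? description.toList ['\n']).getD []
  (pvLoopA ((desc_lines.map (fun l => l.length + 1)).sum) [] desc_lines).map String.ofList

-- ===== PORT B =====
-- `max(i for i in range(81) if line[i].isspace())`: the generator is nonempty whenever the
-- helper reaches it (line[1] is a space), so the total form `.getD 0` is exact; i ≥ 0, so
-- `getD i.toNat` is Python's line[i] (line.length > 80 there).
def pvBreakIdx (line : List Char) : Nat :=
  ((PySem.List.max?
      ((PySem.List.pyRange 0 81).filter (fun i => PySem.Chars.isspace (line.getD i.toNat 'x')))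
      (fun i => i)).getD 0).toNat

-- recursive helper _wrap; the fuel only makes it total in Lean (sufficient under Pre_).
def pvWrap (fuel : Nat) (segment : List Char) : List (List Char) :=
  match fuel with
  | 0 => []
  | f+1 =>
    let line := '#' :: ' ' :: ' ' :: PySem.Chars.lstrip segment
    if line.length ≤ 80 then [line ++ ['\n']]
    else (line.take (pvBreakIdx line) ++ ['\n']) :: pvWrap f (line.drop (pvBreakIdx line + 1))

def process_description_alt (description : String) : List String :=
  (((PySem.Chars.split? description.toList ['\n']).getD []).foldl
      (fun out seg => out ++ pvWrap (seg.length + 1) seg) []).map String.ofList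

-- ===== PRECONDITION & SPEC =====
-- every 78-char window of the line contains a whitespace character
def pvWOK (l : List Char) : Bool :=
  (List.range l.length).all (fun i =>
    decide (l.length < i + 78) ||
      (List.range 78).any (fun d => PySem.Chars.isspace (l.getD (i + d) 'x')))

-- Pre_ excludes descriptions in which some line contains a run of 78 or more consecutive
-- non-whitespace characters: on those inputs A never returns (the wrap loop re-inserts the
-- same segment forever), so there is no value to match (B's recursion does not return either).
def Pre_process_description (description : String) : Prop :=
  ∀ seg ∈ (PySem.Chars.split? description.toList ['\n']).getD [], pvWOK seg = true
instance (description : String) : Decidable (Pre_process_description description) := by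
  unfold Pre_process_description; infer_instance

def pvWitness_process_description : String := "hello world\n  wrap me"

def Spec_process_description (description : String) (out : List String) : Prop :=
  out = process_description_alt description
instance (description : String) (out : List String) : Decidable (Spec_process_description description out) := by
  unfold Spec_process_description; infer_instance

-- ===== CLAIM (what is proved, stated in full; the proofs are below) =====
def Claim_equal_process_description : Prop :=
  ∀ (description : String), Dom_process_description description →
    Pre_process_description description →
    Spec_process_description description (process_description description)

-- ===== LEMMAS AND PROOFS =====

-- Prop form of pvWOK used by the proofs
def pvWOKP (l : List Char) : Prop :=
  ∀ i : Nat, i + 78 ≤ l.length →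
    ∃ j, i ≤ j ∧ j < i + 78 ∧ PySem.Chars.isspace (l.getD j 'x') = true

lemma pvWOK_iff (l : List Char) : pvWOK l = true ↔ pvWOKP l := by
  simp only [pvWOK, pvWOKP, List.all_eq_true, List.any_eq_true, List.mem_range,
    Bool.or_eq_true, decide_eq_true_eq]
  constructor
  · intro h i hi
    rcases h i (by omega) with h' | ⟨d, hd, hsp⟩
    · omega
    · exact ⟨i + d, by omega, by omega, hsp⟩
  · intro h i hi
    by_cases hc : l.length < i + 78
    · exact Or.inl hc
    · rcases h i (by omega) with ⟨j, h1, h2, hsp⟩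
      exact Or.inr ⟨j - i, by omega, by rwa [Nat.add_sub_cancel' h1]⟩

lemma pvWOKP_drop {l : List Char} (h : pvWOKP l) (k : Nat) : pvWOKP (l.drop k) := by
  intro i hi
  rw [List.length_drop] at hi
  rcases h (k + i) (by omega) with ⟨j, h1, h2, hsp⟩
  refine ⟨j - k, by omega, by omega, ?_⟩
  have hjlen : j < l.length := by omega
  have : (l.drop k).getD (j - k) 'x' = l.getD j 'x' := by
    rw [List.getD_eq_getElem?_getD, List.getD_eq_getElem?_getD, List.getElem?_drop,
      Nat.add_sub_cancel' (by omega : k ≤ j)]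
  rwa [this]

lemma pvWOKP_suffix {l l' : List Char} (hs : l' <:+ l) (h : pvWOKP l) : pvWOKP l' := by
  rcases hs with ⟨t, rfl⟩
  have := pvWOKP_drop h t.length
  rwa [List.drop_left] at this

lemma pvWOKP_line {L : List Char} (h : pvWOKP L) : pvWOKP ('#' :: ' ' :: ' ' :: L) := by
  intro i hi
  simp only [List.length_cons] at hi
  match i with
  | 0 => exact ⟨1, by omega, by omega, by simp only [List.getD_cons_succ, List.getD_cons_zero]; decide⟩
  | 1 => exact ⟨1, by omega, by omega, by simp only [List.getD_cons_succ, List.getD_cons_zero]; decide⟩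
  | 2 => exact ⟨2, by omega, by omega, by simp only [List.getD_cons_succ, List.getD_cons_zero]; decide⟩
  | (m+3) =>
    rcases h m (by omega) with ⟨j, h1, h2, hsp⟩
    exact ⟨j + 3, by omega, by omega, by simpa using hsp⟩

lemma pvScan_le (l : List Char) (n : Nat) : pvScan l n ≤ n := by
  induction n with
  | zero => simp [pvScan]
  | succ i ih => simp only [pvScan]; split <;> omega

lemma pvScan_ge {l : List Char} {j n : Nat} (hj : j ≤ n)
    (hs : PySem.Chars.isspace (l.getD j 'x') = true) : j ≤ pvScan l n := by
  induction n with
  | zero => omega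
  | succ i ih =>
    simp only [pvScan]
    split
    · omega
    · rename_i hns
      have : j ≠ i + 1 := by rintro rfl; rw [hs] at hns; exact hns rfl
      exact ih (by omega)

lemma pvScan_space {l : List Char} {n : Nat}
    (h : ∃ j, j ≤ n ∧ PySem.Chars.isspace (l.getD j 'x') = true) :
    PySem.Chars.isspace (l.getD (pvScan l n) 'x') = true := by
  induction n with
  | zero =>
    rcases h with ⟨j, hj, hs⟩
    have : j = 0 := by omega
    subst this; simpa [pvScan] using hs
  | succ i ih =>
    simp only [pvScan]
    split
    · assumption
    · rename_i hns
      rcases h with ⟨j, hj, hs⟩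
      have : j ≠ i + 1 := by rintro rfl; rw [hs] at hns; exact hns rfl
      exact ih ⟨j, by omega, hs⟩

lemma pvScan_max {l : List Char} {n j : Nat} (h1 : pvScan l n < j) (h2 : j ≤ n) :
    PySem.Chars.isspace (l.getD j 'x') = false := by
  induction n with
  | zero => omega
  | succ i ih =>
    rw [pvScan] at h1
    split at h1
    · omega
    · rename_i hns
      rcases Nat.lt_or_ge j (i+1) with hlt | hge
      · exact ih h1 (by omega)
      · have : j = i + 1 := by omega
        subst this
        exact Bool.not_eq_true _ ▸ (by simpa using hns)

lemma pvBreakIdx_eq_scan {line : List Char}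
    (h : ∃ j, j ≤ 80 ∧ PySem.Chars.isspace (line.getD j 'x') = true) :
    pvBreakIdx line = pvScan line 80 := by
  set s := pvScan line 80 with hs
  have hsle : s ≤ 80 := pvScan_le line 80
  have hssp : PySem.Chars.isspace (line.getD s 'x') = true := pvScan_space h
  have hmem : (s : Int) ∈ (PySem.List.pyRange 0 81).filter
      (fun i => PySem.Chars.isspace (line.getD i.toNat 'x')) := by
    rw [List.mem_filter]
    refine ⟨PySem.List.mem_pyRange_one.mpr ⟨by omega, by exact_mod_cast (by omega : s < 81)⟩, ?_⟩
    simpa using hssp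
  rcases hmax : PySem.List.max? ((PySem.List.pyRange 0 81).filter
      (fun i => PySem.Chars.isspace (line.getD i.toNat 'x'))) (fun i => i) with _ | m
  · rw [PySem.List.max?_eq_none_iff] at hmax
    rw [hmax] at hmem; simp at hmem
  · have hm := PySem.List.max?_mem hmax
    rw [List.mem_filter] at hm
    obtain ⟨hmr, hmsp⟩ := hm
    rw [PySem.List.mem_pyRange_one] at hmr
    have hle := PySem.List.max?_isMax hmax (s : Int) hmem
    simp only at hle
    -- m.toNat ≤ s: otherwise the char at m.toNat above s would be non-space
    have hm80 : m.toNat ≤ 80 := by omega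
    have hms : m.toNat ≤ s := by
      by_contra hc
      have := pvScan_max (l := line) (n := 80) (j := m.toNat) (by omega) hm80
      rw [this] at hmsp; exact Bool.noConfusion hmsp
    have : (m.toNat : Int) = m := Int.toNat_of_nonneg (by omega)
    have hsm : s ≤ m.toNat := by omega
    unfold pvBreakIdx
    rw [hmax]
    simp only [Option.getD_some]
    omega

lemma pvStep {seg : List Char} (h : pvWOKP seg)
    (hlong : 80 < ('#' :: ' ' :: ' ' :: PySem.Chars.lstrip seg).length) :
    3 ≤ pvScan ('#' :: ' ' :: ' ' :: PySem.Chars.lstrip seg) 80 ∧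
    (∃ j, j ≤ 80 ∧ PySem.Chars.isspace (('#' :: ' ' :: ' ' :: PySem.Chars.lstrip seg).getD j 'x') = true) ∧
    pvWOKP (('#' :: ' ' :: ' ' :: PySem.Chars.lstrip seg).drop
      (pvScan ('#' :: ' ' :: ' ' :: PySem.Chars.lstrip seg) 80 + 1)) ∧
    (('#' :: ' ' :: ' ' :: PySem.Chars.lstrip seg).drop
      (pvScan ('#' :: ' ' :: ' ' :: PySem.Chars.lstrip seg) 80 + 1)).length + 1 ≤ seg.length := by
  have hL : pvWOKP (PySem.Chars.lstrip seg) :=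
    pvWOKP_suffix (by simpa [PySem.Chars.lstrip] using List.dropWhile_suffix (l := seg) (p := PySem.Chars.isspace)) h
  set L := PySem.Chars.lstrip seg with hLdef
  have hLlen : 78 ≤ L.length := by
    simp only [List.length_cons] at hlong; omega
  have hLseg : L.length ≤ seg.length := by
    simpa [hLdef, PySem.Chars.lstrip] using List.length_dropWhile_le (l := seg) (p := PySem.Chars.isspace)
  obtain ⟨j', hj'0, hj'78, hj'sp⟩ := hL 0 (by omega)
  have hjsp : PySem.Chars.isspace (('#' :: ' ' :: ' ' :: L).getD (j' + 3) 'x') = true := by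
    simpa using hj'sp
  have hex : ∃ j, j ≤ 80 ∧ PySem.Chars.isspace (('#' :: ' ' :: ' ' :: L).getD j 'x') = true :=
    ⟨j' + 3, by omega, hjsp⟩
  have hs3 : 3 ≤ pvScan ('#' :: ' ' :: ' ' :: L) 80 := by
    have := pvScan_ge (l := '#' :: ' ' :: ' ' :: L) (j := j' + 3) (n := 80) (by omega) hjsp
    omega
  refine ⟨hs3, hex, pvWOKP_drop (pvWOKP_line hL) _, ?_⟩
  rw [List.length_drop]
  simp only [List.length_cons]
  omega

lemma pvWrap_fuel : ∀ (n : Nat) (seg : List Char), seg.length ≤ n → pvWOKP seg →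
    ∀ f, seg.length + 1 ≤ f → pvWrap f seg = pvWrap (seg.length + 1) seg := by
  intro n
  induction n with
  | zero =>
    intro seg hn _ f hf
    have : seg = [] := List.eq_nil_of_length_eq_zero (by omega)
    subst this
    obtain ⟨f', rfl⟩ : ∃ f', f = f' + 1 := ⟨f - 1, by omega⟩
    simp [pvWrap, PySem.Chars.lstrip]
  | succ n ih =>
    intro seg hn hwok f hf
    obtain ⟨f', rfl⟩ : ∃ f', f = f' + 1 := ⟨f - 1, by omega⟩
    rw [pvWrap, pvWrap]
    by_cases hlen : ('#' :: ' ' :: ' ' :: PySem.Chars.lstrip seg).length ≤ 80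
    · simp only [if_pos hlen]
    · simp only [if_neg hlen]
      push Not at hlen
      obtain ⟨hs3, hex, hwok', hlt⟩ := pvStep hwok hlen
      rw [pvBreakIdx_eq_scan hex]
      congr 1
      set rem := ('#' :: ' ' :: ' ' :: PySem.Chars.lstrip seg).drop
        (pvScan ('#' :: ' ' :: ' ' :: PySem.Chars.lstrip seg) 80 + 1) with hrem
      rw [ih rem (by omega) hwok' f' (by omega), ih rem (by omega) hwok' seg.length (by omega)]

lemma pvLoopA_eq : ∀ (f : Nat) (todo done : List (List Char)),
    (∀ seg ∈ todo, pvWOKP seg) → (todo.map (fun l => l.length + 1)).sum ≤ f →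
    pvLoopA f done todo = done ++ todo.flatMap (fun seg => pvWrap (seg.length + 1) seg) := by
  intro f
  induction f with
  | zero =>
    intro todo done hwok hsum
    cases todo with
    | nil => simp [pvLoopA]
    | cons e rest => simp at hsum
  | succ f ih =>
    intro todo done hwok hsum
    cases todo with
    | nil => simp [pvLoopA]
    | cons e rest =>
      have hwe : pvWOKP e := hwok e (List.mem_cons_self ..)
      have hwr : ∀ seg ∈ rest, pvWOKP seg := fun seg hs => hwok seg (List.mem_cons_of_mem _ hs)
      simp only [List.map_cons, List.sum_cons] at hsum
      rw [pvLoopA]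
      by_cases hlen : 80 < ('#' :: ' ' :: ' ' :: PySem.Chars.lstrip e).length
      · simp only [if_pos hlen]
        obtain ⟨hs3, hex, hwok', hlt⟩ := pvStep hwe hlen
        set line := '#' :: ' ' :: ' ' :: PySem.Chars.lstrip e with hline
        set s := pvScan line 80 with hsdef
        set rem := line.drop (s + 1) with hrem
        rw [ih (rem :: rest) (done ++ [line.take s ++ ['\n']])
          (by intro seg hs; rcases List.mem_cons.mp hs with rfl | hs; exact hwok'; exact hwr seg hs)
          (by simp only [List.map_cons, List.sum_cons]; omega)]
        rw [List.flatMap_cons, List.flatMap_cons]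
        have hWe : pvWrap (e.length + 1) e =
            (line.take (pvBreakIdx line) ++ ['\n']) :: pvWrap e.length rem := by
          rw [pvWrap]
          simp only [← hline, if_neg (by omega : ¬ line.length ≤ 80)]
          rw [pvBreakIdx_eq_scan hex, ← hsdef, ← hrem]
        rw [hWe, pvBreakIdx_eq_scan hex, ← hsdef,
          pvWrap_fuel rem.length rem le_rfl hwok' e.length (by omega)]
        simp
      · simp only [if_neg hlen]
        push Not at hlen
        rw [ih rest (done ++ [('#' :: ' ' :: ' ' :: PySem.Chars.lstrip e) ++ ['\n']]) hwr (by omega)]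
        rw [List.flatMap_cons]
        have hWe : pvWrap (e.length + 1) e = [('#' :: ' ' :: ' ' :: PySem.Chars.lstrip e) ++ ['\n']] := by
          rw [pvWrap]
          simp only [if_pos hlen]
        rw [hWe]
        simp

-- ===== VERDICT (by name: the statement is the Claim_ definition above) =====
theorem process_description_spec : Claim_equal_process_description := by
  intro description _ hpre
  unfold Spec_process_description process_description process_description_alt
  rw [PySem.List.foldl_append_eq_flatMap]
  show List.map String.ofList _ = _
  rw [pvLoopA_eq _ _ _ (fun seg hs => (pvWOK_iff seg).mp (hpre seg hs)) le_rfl]
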